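-- pv_equiv track=rewrite | github.com/luismanic/prediction-market-backtester | src/pm_bt/common/categories.py | classify_kalshi_event_ticker
-- ===== SOURCE A (Python) =====
-- _KALSHI_GROUP_PATTERNS: tuple[tuple[tuple[str, ...], str], ...] = (
--     (("NCAAF", "NCAAMB", "NFL", "NBA", "MLB", "NHL", "WNBA", "UFC", "F1", "PGA"), "sports"),
--     (
--         (
--             "PRES",
--             "SENATE",
--             "HOUSE",
--             "GOV",
--             "VOTE",
--             "TRUMP",
--             "BIDEN",
--             "EC",
--             "MAYOR",
--             "ELECTION",
--             "CABINET",
--         ),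
--         "politics",
--     ),
--     (("BTC", "ETH", "DOGE", "SOL", "XRP"), "crypto"),
--     (
--         (
--             "FED",
--             "CPI",
--             "GDP",
--             "NASDAQ",
--             "INX",
--             "TNOTE",
--             "USDJPY",
--             "EURUSD",
--             "WTI",
--             "TARIFF",
--         ),
--         "finance",
--     ),
--     (("RAIN", "SNOW", "HIGH", "HUR", "TORNADO", "WEATHER"), "weather"),
--     (
--         (
--             "OSCAR",
--             "GRAMMY",
--             "EMMY",
--             "SPOTIFY",
--             "NETFLIX",
--             "BILLBOARD",
--             "TOPSONG",
--             "TOPARTIST",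
--             "RT",
--         ),
--         "entertainment",
--     ),
--     (("LLM", "AI", "SPACEX", "APPLE"), "science_tech"),
--     (("MENTION", "HEADLINE", "GOOGLESEARCH"), "media"),
-- )
--
-- def classify_kalshi_event_ticker(event_ticker: str | None) -> str | None:
--     """Classify a Kalshi ``event_ticker`` into a normalized top-level category."""
--     if event_ticker is None:
--         return None
--     ticker_upper = event_ticker.upper()
--     ticker_code = ticker_upper.split("-", 1)[0]
--     for patterns, group in _KALSHI_GROUP_PATTERNS:
--         if any(ticker_code.startswith(pattern) for pattern in patterns):
--             return group
--     return "other"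
-- ===== SOURCE B (Python) =====
-- _KALSHI_GROUP_PATTERNS: tuple[tuple[tuple[str, ...], str], ...] = (
--     (("NCAAF", "NCAAMB", "NFL", "NBA", "MLB", "NHL", "WNBA", "UFC", "F1", "PGA"), "sports"),
--     (
--         (
--             "PRES",
--             "SENATE",
--             "HOUSE",
--             "GOV",
--             "VOTE",
--             "TRUMP",
--             "BIDEN",
--             "EC",
--             "MAYOR",
--             "ELECTION",
--             "CABINET",
--         ),
--         "politics",
--     ),
--     (("BTC", "ETH", "DOGE", "SOL", "XRP"), "crypto"),
--     (
--         (
--             "FED",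
--             "CPI",
--             "GDP",
--             "NASDAQ",
--             "INX",
--             "TNOTE",
--             "USDJPY",
--             "EURUSD",
--             "WTI",
--             "TARIFF",
--         ),
--         "finance",
--     ),
--     (("RAIN", "SNOW", "HIGH", "HUR", "TORNADO", "WEATHER"), "weather"),
--     (
--         (
--             "OSCAR",
--             "GRAMMY",
--             "EMMY",
--             "SPOTIFY",
--             "NETFLIX",
--             "BILLBOARD",
--             "TOPSONG",
--             "TOPARTIST",
--             "RT",
--         ),
--         "entertainment",
--     ),
--     (("LLM", "AI", "SPACEX", "APPLE"), "science_tech"),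
--     (("MENTION", "HEADLINE", "GOOGLESEARCH"), "media"),
-- )
--
-- # Prefix index built once: pattern -> (group rank, group).  Group precedence is the rank.
-- _PREFIX_INDEX: dict[str, tuple[int, str]] = {}
-- for _idx, (_patterns, _group) in enumerate(_KALSHI_GROUP_PATTERNS):
--     for _p in _patterns:
--         if _p not in _PREFIX_INDEX:
--             _PREFIX_INDEX[_p] = (_idx, _group)
--
-- _MAX_PREFIX_LEN = max(map(len, _PREFIX_INDEX))
--
--
-- def classify_kalshi_event_ticker(event_ticker: str | None) -> str | None:
--     """Classify a Kalshi ``event_ticker`` into a normalized top-level category."""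
--     if event_ticker is None:
--         return None
--     code = event_ticker.upper().split("-", 1)[0]
--     best = None
--     for i in range(1, min(len(code), _MAX_PREFIX_LEN) + 1):
--         hit = _PREFIX_INDEX.get(code[:i])
--         if hit is not None and (best is None or hit[0] < best[0]):
--             best = hit
--     return best[1] if best is not None else "other"
-- ===== Notes on version B (the rewrite author's own statement) =====
-- stated objective: alternative
-- what changed: Replaces A's ordered scan of the pattern table with any(startswith) per group by a prefix index built once (pattern -> (group rank, group)): B walks the ticker code's prefixes, looks each up in the index, and keeps the hit with the smallest group rank, which encodes A's first-group-wins precedence.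
import Mathlib
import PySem

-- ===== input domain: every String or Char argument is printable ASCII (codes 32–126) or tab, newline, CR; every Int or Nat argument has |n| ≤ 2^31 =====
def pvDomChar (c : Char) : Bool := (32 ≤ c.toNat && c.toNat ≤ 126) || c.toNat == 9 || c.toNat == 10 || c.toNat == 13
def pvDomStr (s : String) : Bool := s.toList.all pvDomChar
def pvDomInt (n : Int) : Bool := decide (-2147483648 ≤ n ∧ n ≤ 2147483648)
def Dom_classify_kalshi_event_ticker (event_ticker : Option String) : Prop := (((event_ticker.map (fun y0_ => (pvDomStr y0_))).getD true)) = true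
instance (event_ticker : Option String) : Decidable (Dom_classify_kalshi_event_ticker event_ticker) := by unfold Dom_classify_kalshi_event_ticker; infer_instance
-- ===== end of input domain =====

-- B replaces A's table scan (first group whose patterns contain a startswith hit) by a prefix index
-- built once (pattern -> (group rank, group)): it looks up every prefix of the code and keeps the
-- hit with the smallest group rank; objective: alternative data structure, same exact result.

-- ===== PORT A =====
-- _KALSHI_GROUP_PATTERNS
def pats : List (List String × String) :=
  [ (["NCAAF", "NCAAMB", "NFL", "NBA", "MLB", "NHL", "WNBA", "UFC", "F1", "PGA"], "sports"),
    (["PRES", "SENATE", "HOUSE", "GOV", "VOTE", "TRUMP", "BIDEN", "EC", "MAYOR", "ELECTION", "CABINET"], "politics"),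
    (["BTC", "ETH", "DOGE", "SOL", "XRP"], "crypto"),
    (["FED", "CPI", "GDP", "NASDAQ", "INX", "TNOTE", "USDJPY", "EURUSD", "WTI", "TARIFF"], "finance"),
    (["RAIN", "SNOW", "HIGH", "HUR", "TORNADO", "WEATHER"], "weather"),
    (["OSCAR", "GRAMMY", "EMMY", "SPOTIFY", "NETFLIX", "BILLBOARD", "TOPSONG", "TOPARTIST", "RT"], "entertainment"),
    (["LLM", "AI", "SPACEX", "APPLE"], "science_tech"),
    (["MENTION", "HEADLINE", "GOOGLESEARCH"], "media") ]

-- the 'for patterns, group in _KALSHI_GROUP_PATTERNS: if any(...): return group' loop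
def goA (code : String) : List (List String × String) → String
  | [] => "other"
  | (ps, g) :: rest =>
    if ps.any (fun p => PySem.Str.startswith code p) then g else goA code rest

def classify_kalshi_event_ticker (event_ticker : Option String) : Option String :=
  match event_ticker with
  | none => none
  | some s =>
    let ticker_upper := PySem.Str.upper s
    -- split('-', 1) always returns a nonempty list, so [0] is its head
    let ticker_code := ((PySem.Str.splitMax? ticker_upper "-" 1).getD []).headD ""
    some (goA ticker_code pats)

-- ===== PORT B =====
-- module-level loop building _PREFIX_INDEX: pattern -> (group rank, group), first writer wins
def prefixIndex : PySem.Dict String (Int × String) :=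
  (PySem.List.enumerate pats).foldl
    (fun d ig => ig.2.1.foldl
      (fun d p => if d.contains p then d else d.insert p (ig.1, ig.2.2)) d)
    PySem.Dict.empty

-- loop body: hit = _PREFIX_INDEX.get(code[:i]); keep the hit with the smallest rank
def bStep (code : String) (best : Option (Int × String)) (i : Int) : Option (Int × String) :=
  match prefixIndex.get? (PySem.Str.slice code none (some i)) with
  | none => best
  | some hit =>
    match best with
    | none => some hit
    | some b => if hit.1 < b.1 then some hit else some b

-- _MAX_PREFIX_LEN = max(map(len, _PREFIX_INDEX)); the index is nonempty, so Python's max returns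
def maxPrefixLen : Int :=
  ((PySem.List.max? (prefixIndex.keys.map PySem.Str.len) (fun x => x)).getD 0)

def classify_kalshi_event_ticker_alt (event_ticker : Option String) : Option String :=
  match event_ticker with
  | none => none
  | some s =>
    let code := ((PySem.Str.splitMax? (PySem.Str.upper s) "-" 1).getD []).headD ""
    let best := (PySem.List.pyRange 1 (min (PySem.Str.len code) maxPrefixLen + 1)).foldl (bStep code) none
    some (match best with | some b => b.2 | none => "other")

-- ===== PRECONDITION & SPEC =====
def Spec_classify_kalshi_event_ticker (event_ticker : Option String) (out : Option String) : Prop := out = classify_kalshi_event_ticker_alt event_ticker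
instance (event_ticker : Option String) (out : Option String) : Decidable (Spec_classify_kalshi_event_ticker event_ticker out) := by unfold Spec_classify_kalshi_event_ticker; infer_instance

-- ===== CLAIM (what is proved, stated in full; the proofs are below) =====
def Claim_equal_classify_kalshi_event_ticker : Prop := ∀ (event_ticker : Option String), Dom_classify_kalshi_event_ticker event_ticker → Spec_classify_kalshi_event_ticker event_ticker (classify_kalshi_event_ticker event_ticker)

-- ===== LEMMAS AND PROOFS =====

-- the pattern table flattened with its group rank: (pattern, rank, group), in A's scan order
def flatOf : List (List String × String) → Int → List (String × Int × String)
  | [], _ => []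
  | (ps, g) :: rest, k => ps.map (fun p => (p, k, g)) ++ flatOf rest (k + 1)

def flat : List (String × Int × String) := flatOf pats 0

-- concrete facts about the table
set_option maxRecDepth 8192 in
lemma flat_len_pos : ∀ t ∈ flat, 1 ≤ t.1.toList.length := by decide
set_option maxRecDepth 8192 in
lemma flat_idx_mono : flat.Pairwise (fun a b => a.2.1 ≤ b.2.1) := by decide
set_option maxRecDepth 8192 in
lemma flat_key_inj : ∀ t ∈ flat, ∀ t' ∈ flat, t.1 = t'.1 → t = t' := by decide
set_option maxRecDepth 8192 in
lemma flat_idx_det : ∀ t ∈ flat, ∀ t' ∈ flat, t.2.1 = t'.2.1 → t.2.2 = t'.2.2 := by decide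
set_option maxRecDepth 8192 in
lemma flat_len_le : ∀ t ∈ flat, t.1.toList.length ≤ 12 := by decide
set_option maxRecDepth 8192 in
lemma maxPrefixLen_eq : maxPrefixLen = 12 := by decide
set_option maxRecDepth 8192 in
lemma prefixIndex_eq : prefixIndex = PySem.Dict.mk flat := by decide

lemma get?_mk_eq_find? {ν : Type} (l : List (String × ν)) (k : String) :
    (PySem.Dict.mk l).get? k = (l.find? (fun p => p.1 == k)).map (·.2) := by
  induction l with
  | nil => simp [PySem.Dict.get?]
  | cons h t ih =>
    obtain ⟨k0, v0⟩ := h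
    rw [PySem.Dict.get?_mk_cons, List.find?_cons]
    cases hh : (k0 == k) with
    | true => simp
    | false => simp [ih]

lemma get?_prefixIndex (k : String) :
    prefixIndex.get? k = (flat.find? (fun t => t.1 == k)).map (·.2) := by
  rw [prefixIndex_eq, get?_mk_eq_find?]

-- code[:i] equals a pattern p  iff  p is a prefix of code of length i  (for 1 ≤ i ≤ len(code))
lemma key_eq_iff (code p : String) (i : Int) (h1 : 0 ≤ i) (h2 : i ≤ (code.toList.length : Int)) :
    (p = PySem.Str.slice code none (some i)) ↔
      (PySem.Str.startswith code p = true ∧ (p.toList.length : Int) = i) := by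
  rw [← String.toList_inj, PySem.Str.toList_slice, PySem.Str.startswith_eq,
      PySem.Chars.startswith_iff]
  show p.toList = PySem.List.slice code.toList none (some i) ↔ _
  rw [PySem.List.slice_to _ h1]
  constructor
  · intro h
    rw [h]
    refine ⟨List.take_prefix _ _, ?_⟩
    rw [List.length_take]
    omega
  · rintro ⟨hpre, hlen⟩
    rw [List.prefix_iff_eq_take] at hpre
    have hn : p.toList.length = i.toNat := by omega
    rw [hpre, hn]

-- the best-hit merge of B's loop
def merge (b : Option (Int × String)) (h : Int × String) : Option (Int × String) :=
  match b with
  | none => some h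
  | some b0 => if h.1 < b0.1 then some h else some b0

-- "b is a minimal-rank element of l (or l is empty)"
def IsBest (l : List (Int × String)) (b : Option (Int × String)) : Prop :=
  match b with
  | none => l = []
  | some v => v ∈ l ∧ ∀ w ∈ l, v.1 ≤ w.1

lemma foldl_merge_isBest (l : List (Int × String)) : IsBest l (l.foldl merge none) := by
  induction l using List.reverseRecOn with
  | nil => simp [IsBest]
  | append_singleton l x ih =>
    rw [List.foldl_concat]
    cases hb : l.foldl merge none with
    | none =>
      rw [hb] at ih
      simp only [IsBest] at ih
      subst ih
      simp [merge, IsBest]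
    | some v =>
      rw [hb] at ih
      obtain ⟨hmem, hmin⟩ := ih
      simp only [merge]
      split_ifs with hlt
      · refine ⟨by simp, ?_⟩
        intro w hw
        rcases List.mem_append.mp hw with h | h
        · exact le_of_lt (lt_of_lt_of_le hlt (hmin w h))
        · simp at h; subst h; omega
      · refine ⟨by simp [hmem], ?_⟩
        intro w hw
        rcases List.mem_append.mp hw with h | h
        · exact hmin w h
        · simp at h; subst h; omega

-- B's loop is the merge-fold over the looked-up hits
def hits (code : String) : List (Int × String) :=
  (PySem.List.pyRange 1 (min (code.toList.length : Int) maxPrefixLen + 1)).filterMap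
    (fun i => (flat.find? (fun t => t.1 == PySem.Str.slice code none (some i))).map (·.2))

lemma bfold_eq (code : String) :
    (PySem.List.pyRange 1 (min (PySem.Str.len code) maxPrefixLen + 1)).foldl (bStep code) none
      = (hits code).foldl merge none := by
  rw [PySem.Str.len_eq]
  unfold hits
  rw [List.foldl_filterMap]
  apply PySem.List.foldl_congr_mem
  intro acc i _
  show bStep code acc i = _
  unfold bStep
  rw [get?_prefixIndex]
  cases flat.find? (fun t => t.1 == PySem.Str.slice code none (some i)) with
  | none => rfl
  | some t => cases acc <;> rfl

-- membership in the looked-up hits = a matching table entry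
lemma mem_hits (code : String) (x : Int × String) :
    x ∈ hits code ↔ ∃ t ∈ flat, PySem.Str.startswith code t.1 = true ∧ t.2 = x := by
  unfold hits
  rw [List.mem_filterMap]
  constructor
  · rintro ⟨i, hi, hx⟩
    rw [PySem.List.mem_pyRange_one] at hi
    rw [min_def] at hi
    rw [Option.map_eq_some_iff] at hx
    obtain ⟨t, hfind, hx⟩ := hx
    have hmem := List.mem_of_find?_eq_some hfind
    have hp := List.find?_some hfind
    rw [beq_iff_eq] at hp
    have hML := maxPrefixLen_eq
    have := (key_eq_iff code t.1 i (by omega) (by rw [hML] at hi; omega)).mp hp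
    exact ⟨t, hmem, this.1, hx⟩
  · rintro ⟨t, hmem, hsw, hx⟩
    have hlen := flat_len_pos t hmem
    have hle : t.1.toList.length ≤ code.toList.length := by
      have := (PySem.Chars.startswith_iff code.toList t.1.toList).mp
        (by rw [← PySem.Str.startswith_eq]; exact hsw)
      exact this.length_le
    have hle12 := flat_len_le t hmem
    have hML := maxPrefixLen_eq
    refine ⟨(t.1.toList.length : Int), ?_, ?_⟩
    · rw [PySem.List.mem_pyRange_one, hML]; omega
    · have hkey : (t.1 = PySem.Str.slice code none (some (t.1.toList.length : Int))) :=
        (key_eq_iff code t.1 _ (by omega) (by omega)).mpr ⟨hsw, rfl⟩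
      have hsome : (flat.find? (fun t' => t'.1 == PySem.Str.slice code none (some (t.1.toList.length : Int)))).isSome := by
        rw [List.find?_isSome]
        exact ⟨t, hmem, beq_iff_eq.mpr hkey⟩
      obtain ⟨t', hfind⟩ := Option.isSome_iff_exists.mp hsome
      have ht'mem := List.mem_of_find?_eq_some hfind
      have ht'p := List.find?_some hfind
      rw [beq_iff_eq] at ht'p
      have : t' = t := flat_key_inj t' ht'mem t hmem (by rw [ht'p, ← hkey])
      rw [hfind, this]
      simpa using hx

-- a group segment of the flattened table
lemma seg_find (code : String) (ps : List String) (k : Int) (g : String) :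
    ((ps.map (fun p => (p, k, g))).find? (fun t => PySem.Str.startswith code t.1))
      = (ps.find? (fun p => PySem.Str.startswith code p)).map (fun p => (p, k, g)) := by
  induction ps with
  | nil => rfl
  | cons p rest ih =>
    rw [List.map_cons]
    cases hsw : PySem.Str.startswith code p with
    | true =>
      rw [List.find?_cons_of_pos (by exact hsw), List.find?_cons_of_pos hsw]
      rfl
    | false =>
      have hneg1 : ¬ (fun t : String × ℤ × String => PySem.Str.startswith code t.1) (p, k, g) = true := by
        intro hc
        have hc' : PySem.Str.startswith code p = true := hc
        rw [hsw] at hc'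
        exact Bool.false_ne_true hc'
      rw [List.find?_cons_of_neg hneg1,
          List.find?_cons_of_neg (by rw [hsw]; exact Bool.false_ne_true), ih]

-- A's scan = first matching entry of the flattened table
lemma goA_eq (code : String) : ∀ (l : List (List String × String)) (k : Int),
    goA code l = (((flatOf l k).find? (fun t => PySem.Str.startswith code t.1)).map
      (fun t => t.2.2)).getD "other" := by
  intro l
  induction l with
  | nil => intro k; rfl
  | cons hd rest ih =>
    intro k
    obtain ⟨ps, g⟩ := hd
    show (if ps.any _ then g else goA code rest) = _
    rw [show flatOf ((ps, g) :: rest) k = ps.map (fun p => (p, k, g)) ++ flatOf rest (k + 1) from rfl,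
        List.find?_append, seg_find]
    cases hfind : ps.find? (fun p => PySem.Str.startswith code p) with
    | none =>
      have hall := List.find?_eq_none.mp hfind
      have hany : ps.any (fun p => PySem.Str.startswith code p) = false := by
        rw [List.any_eq_false]
        exact fun x hx => hall x hx
      rw [hany, ih (k + 1)]
      rfl
    | some p =>
      have hany : ps.any (fun p => PySem.Str.startswith code p) = true :=
        List.any_eq_true.mpr ⟨p, List.mem_of_find?_eq_some hfind, List.find?_some hfind⟩
      rw [hany]
      rfl

-- main: on any code string the two computations agree
set_option maxRecDepth 8192 in
lemma main_eq (code : String) :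
    goA code pats =
      ((((PySem.List.pyRange 1 (min (PySem.Str.len code) maxPrefixLen + 1)).foldl (bStep code) none).map
        (fun b => b.2)).getD "other") := by
  rw [bfold_eq, goA_eq code pats 0]
  have hbest := foldl_merge_isBest (hits code)
  set M := flat.filter (fun t => PySem.Str.startswith code t.1) with hM
  have hflat : flatOf pats 0 = flat := rfl
  have hhead : flat.find? (fun t => PySem.Str.startswith code t.1) = M.head? :=
    (List.head?_filter).symm
  rw [hflat, hhead]
  cases hb : (hits code).foldl merge none with
  | none =>
    rw [Option.map_none, Option.getD_none]
    rw [hb] at hbest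
    simp only [IsBest] at hbest
    have hMnil : M = [] := by
      rcases hM0 : M with _ | ⟨t, rest⟩
      · rfl
      · exfalso
        have htM : t ∈ M := by rw [hM0]; exact List.mem_cons_self
        rw [hM, List.mem_filter] at htM
        have : t.2 ∈ hits code := (mem_hits code t.2).mpr ⟨t, htM.1, htM.2, rfl⟩
        rw [hbest] at this
        exact List.not_mem_nil this
    rw [hMnil]
    rfl
  | some v =>
    rw [Option.map_some, Option.getD_some]
    rw [hb] at hbest
    obtain ⟨hvmem, hvmin⟩ := hbest
    obtain ⟨t, htflat, htsw, htv⟩ := (mem_hits code v).mp hvmem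
    rcases hM0 : M with _ | ⟨t0, rest⟩
    · exfalso
      have : t ∈ M := by rw [hM, List.mem_filter]; exact ⟨htflat, htsw⟩
      rw [hM0] at this
      exact List.not_mem_nil this
    · have ht0M : t0 ∈ M := by rw [hM0]; exact List.mem_cons_self
      rw [hM, List.mem_filter] at ht0M
      have hMpair : M.Pairwise (fun a b => a.2.1 ≤ b.2.1) :=
        List.Pairwise.sublist List.filter_sublist flat_idx_mono
      rw [hM0] at hMpair
      have ht0min : ∀ w ∈ rest, t0.2.1 ≤ w.2.1 := fun w hw =>
        (List.pairwise_cons.mp hMpair).1 w hw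
      -- v.1 ≤ t0.2.1 : t0's hit is in hits
      have ht0hit : t0.2 ∈ hits code := (mem_hits code t0.2).mpr ⟨t0, ht0M.1, ht0M.2, rfl⟩
      have h1 : v.1 ≤ t0.2.1 := hvmin t0.2 ht0hit
      -- t0.2.1 ≤ v.1 : v comes from t ∈ M, t0 is minimal in M
      have htM : t ∈ M := by rw [hM, List.mem_filter]; exact ⟨htflat, htsw⟩
      have h2 : t0.2.1 ≤ t.2.1 := by
        rw [hM0] at htM
        rcases List.mem_cons.mp htM with h | h
        · rw [h]
        · exact ht0min t h
      have hidx : t0.2.1 = v.1 := by rw [← htv] at h1 ⊢; omega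
      have hval : t0.2.2 = v.2 := by
        rw [← htv]
        exact flat_idx_det t0 ht0M.1 t htflat (by rw [hidx, ← htv])
      simp only [List.head?_cons, Option.map_some, Option.getD_some]
      exact hval

-- ===== VERDICT (by name: the statement is the Claim_ definition above) =====
set_option maxRecDepth 8192 in
theorem classify_kalshi_event_ticker_spec : Claim_equal_classify_kalshi_event_ticker := by
  intro et _
  unfold Spec_classify_kalshi_event_ticker
  cases et with
  | none => rfl
  | some s =>
    have hA : classify_kalshi_event_ticker (some s)
        = some (goA (((PySem.Str.splitMax? (PySem.Str.upper s) "-" 1).getD []).headD "") pats) := rfl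
    have hB : classify_kalshi_event_ticker_alt (some s)
        = some (match (PySem.List.pyRange 1 (min (PySem.Str.len (((PySem.Str.splitMax? (PySem.Str.upper s) "-" 1).getD []).headD "")) maxPrefixLen + 1)).foldl
            (bStep (((PySem.Str.splitMax? (PySem.Str.upper s) "-" 1).getD []).headD "")) none with
          | some b => b.2
          | none => "other") := rfl
    rw [hA, hB]
    have h := main_eq (((PySem.Str.splitMax? (PySem.Str.upper s) "-" 1).getD []).headD "")
    cases hb : (PySem.List.pyRange 1 (min (PySem.Str.len (((PySem.Str.splitMax? (PySem.Str.upper s) "-" 1).getD []).headD "")) maxPrefixLen + 1)).foldl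
        (bStep (((PySem.Str.splitMax? (PySem.Str.upper s) "-" 1).getD []).headD "")) none with
    | none =>
      rw [hb, Option.map_none, Option.getD_none] at h
      rw [h]
    | some v =>
      rw [hb, Option.map_some, Option.getD_some] at h
      rw [h]
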